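-- pv_equiv track=rewrite | github.com/nickovic/rtamt | rtamt/operation/stl_ct_offline/always_operation.py | offline
-- ===== SOURCE A (Python) =====
-- def offline(*args, **kargs):
--     out = []
--     input_list = args[0]
--
--     i=0
--     while i < len(input_list):
--         temp_nums = [ i[1] for i in input_list[i:len(input_list)] ]
--         temp_min = min(temp_nums)
--         min_indexs = [i for i, x in enumerate(temp_nums) if x == temp_min]
--         out.append([input_list[i][0], temp_min])
--
--         if min_indexs[-1] == 0:
--             i = i + 1
--         elif i+min_indexs[-1] == len(input_list)-1:
--             out.append([input_list[-1][0], temp_min])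
--             break
--         else:
--             i = i+min_indexs[-1]+1
--
--     return out
-- ===== SOURCE B (Python) =====
-- def offline(*args, **kargs):
--     input_list = args[0]
--     n = len(input_list)
--     # one backward pass: suf[j] = (min of values j..n-1, last index achieving it)
--     suf = [None] * n
--     m = None
--     li = 0
--     for j in range(n - 1, -1, -1):
--         v = input_list[j][1]
--         if m is None or v < m:
--             m = v
--             li = j
--         suf[j] = (m, li)
--     out = []
--     i = 0
--     while i < n:
--         mn, li = suf[i]
--         out.append([input_list[i][0], mn])
--         if li == i:
--             i += 1
--         elif li == n - 1:
--             out.append([input_list[-1][0], mn])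
--             break
--         else:
--             i = li + 1
--     return out
-- ===== Notes on version B (the rewrite author's own statement) =====
-- stated objective: alternative
-- what changed: B precomputes, in one backward pass, the suffix minimum and the absolute index of its last occurrence for every position, so the jump loop reads a table entry instead of A's full rescan (min + argmin of the whole remaining suffix) at every step.
import Mathlib
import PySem

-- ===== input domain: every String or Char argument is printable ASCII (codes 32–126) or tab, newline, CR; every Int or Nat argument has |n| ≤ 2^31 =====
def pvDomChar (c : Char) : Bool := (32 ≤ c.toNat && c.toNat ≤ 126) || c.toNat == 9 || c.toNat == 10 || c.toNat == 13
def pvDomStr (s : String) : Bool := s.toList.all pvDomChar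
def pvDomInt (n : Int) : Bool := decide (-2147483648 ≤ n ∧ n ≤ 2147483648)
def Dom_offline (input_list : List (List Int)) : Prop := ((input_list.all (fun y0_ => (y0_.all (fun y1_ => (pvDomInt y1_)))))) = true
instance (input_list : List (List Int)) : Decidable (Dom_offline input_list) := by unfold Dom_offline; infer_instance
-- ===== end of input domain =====

-- B computes the suffix minima and last-argmin indices in one backward pass and lets the
-- jump loop read that table, where A rescans the whole remaining suffix at every step.

-- ===== PORT A =====
-- row[0] / row[1]; total via getD, exact under Pre_ (rows of length ≥ 2)
def pvTime (r : List Int) : Int := (PySem.List.pyGet? r 0).getD 0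
def pvVal (r : List Int) : Int := (PySem.List.pyGet? r 1).getD 0

-- temp_min = min([x[1] for x in input_list[i:len(input_list)]])
def aMin (xs : List (List Int)) (i : Int) : Int :=
  (PySem.List.min? ((PySem.List.slice xs (some i) (some (xs.length : Int))).map pvVal)
    (fun y => y)).getD 0

-- min_indexs[-1] : last index of temp_min among the suffix values
def aLast (xs : List (List Int)) (i : Int) : Int :=
  (((((PySem.List.enumerate
        ((PySem.List.slice xs (some i) (some (xs.length : Int))).map pvVal) 0)).filter
      (fun p => p.2 == aMin xs i)).map (fun p => p.1)).getLast?).getD 0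

-- the while-loop of A; fuel = len(input_list) bounds the iterations (i strictly increases)
def offlineLoop (xs : List (List Int)) : Nat → Int → List (List Int)
  | 0, _ => []
  | fuel+1, i =>
    if i < (xs.length : Int) then
      if aLast xs i = 0 then
        [pvTime ((PySem.List.pyGet? xs i).getD []), aMin xs i] :: offlineLoop xs fuel (i + 1)
      else if i + aLast xs i = (xs.length : Int) - 1 then
        [pvTime ((PySem.List.pyGet? xs i).getD []), aMin xs i] ::
          [[pvTime ((PySem.List.pyGet? xs (-1)).getD []), aMin xs i]]
      else
        [pvTime ((PySem.List.pyGet? xs i).getD []), aMin xs i] ::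
          offlineLoop xs fuel (i + aLast xs i + 1)
    else []

def offline (input_list : List (List Int)) : List (List Int) :=
  offlineLoop input_list input_list.length 0

-- ===== PORT B =====
-- one backward pass (Source B's `for j in range(n-1,-1,-1)` as right-to-left recursion):
-- entry j carries (min of values j.., absolute index of its LAST occurrence)
def sufBuild : List (List Int) → Int → List (Int × Int)
  | [], _ => []
  | [r], j => [(pvVal r, j)]                -- Source B's `m is None` initialisation
  | r :: r2 :: rest2, j =>
    let tail := sufBuild (r2 :: rest2) (j + 1)
    let p := tail.headD (0, 0)
    if pvVal r < p.1 then (pvVal r, j) :: tail else p :: tail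

-- Source B's jump loop: reads the precomputed table instead of rescanning the suffix
def altLoop (xs : List (List Int)) (suf : List (Int × Int)) : Nat → Int → List (List Int)
  | 0, _ => []
  | fuel+1, i =>
    if i < (xs.length : Int) then
      let p := (PySem.List.pyGet? suf i).getD (0, 0)
      if p.2 = i then
        [pvTime ((PySem.List.pyGet? xs i).getD []), p.1] :: altLoop xs suf fuel (i + 1)
      else if p.2 = (xs.length : Int) - 1 then
        [pvTime ((PySem.List.pyGet? xs i).getD []), p.1] ::
          [[pvTime ((PySem.List.pyGet? xs (-1)).getD []), p.1]]
      else
        [pvTime ((PySem.List.pyGet? xs i).getD []), p.1] :: altLoop xs suf fuel (p.2 + 1)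
    else []

def offline_alt (input_list : List (List Int)) : List (List Int) :=
  altLoop input_list (sufBuild input_list 0) input_list.length 0

-- ===== PRECONDITION & SPEC =====
-- Pre_ excludes exactly the inputs where the Python A raises: lists containing a row
-- shorter than 2 (IndexError on row[1] / row[0]).
def Pre_offline (input_list : List (List Int)) : Prop :=
  ∀ r ∈ input_list, 2 ≤ r.length
instance (input_list : List (List Int)) : Decidable (Pre_offline input_list) := by
  unfold Pre_offline; infer_instance
def pvWitness_offline : List (List Int) := [[0, 5], [1, 2], [2, 3]]

def Spec_offline (input_list : List (List Int)) (out : List (List Int)) : Prop := out = offline_alt input_list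
instance (input_list : List (List Int)) (out : List (List Int)) : Decidable (Spec_offline input_list out) := by unfold Spec_offline; infer_instance

-- ===== CLAIM (what is proved, stated in full; the proofs are below) =====
def Claim_equal_offline : Prop := ∀ (input_list : List (List Int)), Dom_offline input_list → Pre_offline input_list → Spec_offline input_list (offline input_list)

-- ===== LEMMAS AND PROOFS =====

-- reference suffix extrema: minimum of a nonempty list, index of its last occurrence
def specMin : List Int → Int
  | [] => 0
  | v :: ys => if ys = [] then v else min v (specMin ys)

def specLast : List Int → Nat
  | [] => 0
  | v :: ys => if ys = [] then 0 else if specMin ys ≤ v then specLast ys + 1 else 0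

-- last occurrence index of m in l (meaningful when m ∈ l)
def lastIdxOf : List Int → Int → Nat
  | [], _ => 0
  | _ :: ys, m => if m ∈ ys then lastIdxOf ys m + 1 else 0

lemma specMin_cons2 (v w : Int) (t : List Int) :
    specMin (v :: w :: t) = min v (specMin (w :: t)) := by
  rw [specMin, if_neg (by simp)]

lemma specLast_cons2 (v w : Int) (t : List Int) :
    specLast (v :: w :: t) = if specMin (w :: t) ≤ v then specLast (w :: t) + 1 else 0 := by
  rw [specLast, if_neg (by simp)]

lemma specMin_le (l : List Int) : ∀ y ∈ l, specMin l ≤ y := by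
  induction l with
  | nil => intro y hy; cases hy
  | cons v ys ih =>
    intro y hy
    cases ys with
    | nil => simp at hy; simp [specMin, hy]
    | cons w t =>
      rcases List.mem_cons.mp hy with rfl | hy
      · rw [specMin_cons2]; exact min_le_left _ _
      · rw [specMin_cons2]; exact le_trans (min_le_right _ _) (ih y hy)

lemma specMin_mem (l : List Int) (h : l ≠ []) : specMin l ∈ l := by
  induction l with
  | nil => exact absurd rfl h
  | cons v ys ih =>
    cases ys with
    | nil => simp [specMin]
    | cons w t =>
      rcases le_total v (specMin (w :: t)) with hle | hle
      · rw [specMin_cons2, min_eq_left hle]; exact List.mem_cons_self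
      · rw [specMin_cons2, min_eq_right hle]
        exact List.mem_cons_of_mem _ (ih (by simp))

lemma foldl_min_spec (t : List Int) (x : Int) (h : t ≠ []) :
    t.foldl min x = min x (specMin t) := by
  induction t generalizing x with
  | nil => exact absurd rfl h
  | cons w ys ih =>
    cases ys with
    | nil => simp [specMin, List.foldl]
    | cons z u =>
      calc List.foldl min x (w :: z :: u) = List.foldl min (min x w) (z :: u) := rfl
        _ = min (min x w) (specMin (z :: u)) := ih _ (by simp)
        _ = min x (min w (specMin (z :: u))) := min_assoc _ _ _
        _ = min x (specMin (w :: z :: u)) := by rw [specMin_cons2]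

lemma amin_spec (l : List Int) (h : l ≠ []) :
    (PySem.List.min? l (fun y => y)).getD 0 = specMin l := by
  cases l with
  | nil => exact absurd rfl h
  | cons x t =>
    rw [PySem.List.min?_id_cons]
    cases t with
    | nil => simp [specMin]
    | cons w u =>
      rw [Option.getD_some, foldl_min_spec _ _ (by simp), specMin_cons2]

lemma filter_enumerate_nil (l : List Int) (s m : Int) (h : m ∉ l) :
    (PySem.List.enumerate l s).filter (fun p => p.2 == m) = [] := by
  induction l generalizing s with
  | nil => simp [PySem.List.enumerate]
  | cons v ys ih =>
    simp only [List.mem_cons, not_or] at h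
    have hvm : ((s, v).2 == m) = false := by
      simp only [beq_eq_false_iff_ne]
      exact fun e => h.1 e.symm
    rw [PySem.List.enumerate_cons, List.filter_cons, hvm]
    simp only [Bool.false_eq_true, if_false]
    exact ih (s + 1) h.2

lemma lastF (l : List Int) (s m : Int) (h : m ∈ l) :
    ((((PySem.List.enumerate l s).filter (fun p => p.2 == m)).map (fun p => p.1)).getLast?)
      = some (s + (lastIdxOf l m : Int)) := by
  induction l generalizing s with
  | nil => cases h
  | cons v ys ih =>
    rw [PySem.List.enumerate_cons, List.filter_cons]
    by_cases hm : m ∈ ys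
    · have hih := ih (s + 1) hm
      have hcons : lastIdxOf (v :: ys) m = lastIdxOf ys m + 1 := by
        rw [lastIdxOf, if_pos hm]
      by_cases hv : ((s, v).2 == m) = true
      · rw [if_pos hv, List.map_cons, List.getLast?_cons, hih, Option.getD_some, hcons]
        congr 1; push_cast; ring
      · rw [if_neg hv, hih, hcons]
        congr 1; push_cast; ring
    · have hv : v = m := by
        rcases List.mem_cons.mp h with h' | h'
        · exact h'.symm
        · exact absurd h' hm
      have hb : ((s, v).2 == m) = true := by simp [hv]
      have hL : lastIdxOf (v :: ys) m = 0 := by rw [lastIdxOf, if_neg hm]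
      rw [if_pos hb, filter_enumerate_nil ys (s + 1) m hm, hL]
      simp

lemma lastG (l : List Int) (h : l ≠ []) : lastIdxOf l (specMin l) = specLast l := by
  induction l with
  | nil => exact absurd rfl h
  | cons v ys ih =>
    cases ys with
    | nil => simp [specMin, lastIdxOf, specLast]
    | cons w t =>
      by_cases hle : specMin (w :: t) ≤ v
      · have he : specMin (v :: w :: t) = specMin (w :: t) := by
          rw [specMin_cons2]; exact min_eq_right hle
        have hmem : specMin (w :: t) ∈ (w :: t) := specMin_mem _ (by simp)
        rw [he, lastIdxOf, if_pos hmem, ih (by simp), specLast_cons2, if_pos hle]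
      · have hlt : v < specMin (w :: t) := lt_of_not_ge hle
        have he : specMin (v :: w :: t) = v := by
          rw [specMin_cons2]; exact min_eq_left (le_of_lt hlt)
        have hnm : v ∉ (w :: t) := fun hmem => absurd (specMin_le _ v hmem) (not_le.mpr hlt)
        rw [he, lastIdxOf, if_neg hnm, specLast_cons2, if_neg hle]

lemma sufBuild_unfold (r r2 : List Int) (rest2 : List (List Int)) (j : Int) :
    sufBuild (r :: r2 :: rest2) j =
      if pvVal r < ((sufBuild (r2 :: rest2) (j + 1)).headD (0, 0)).1 then
        (pvVal r, j) :: sufBuild (r2 :: rest2) (j + 1)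
      else
        ((sufBuild (r2 :: rest2) (j + 1)).headD (0, 0)) :: sufBuild (r2 :: rest2) (j + 1) := rfl

lemma sufBuild_get_succ (r : List Int) (rest : List (List Int)) (j : Int) (k : Nat) :
    (sufBuild (r :: rest) j)[k+1]? = (sufBuild rest (j + 1))[k]? := by
  cases rest with
  | nil => simp [sufBuild]
  | cons r2 rest2 =>
    rw [sufBuild_unfold]
    split <;> rw [List.getElem?_cons_succ]

lemma sufBuild_head (l : List (List Int)) (h : l ≠ []) : ∀ (j : Int),
    (sufBuild l j).head? = some (specMin (l.map pvVal), j + (specLast (l.map pvVal) : Int)) := by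
  induction l with
  | nil => exact absurd rfl h
  | cons r rest ih =>
    intro j
    cases rest with
    | nil =>
      simp [sufBuild, specMin, specLast]
    | cons r2 rest2 =>
      have hih := ih (by simp) (j + 1)
      have hD : (sufBuild (r2 :: rest2) (j + 1)).headD (0, 0)
          = (specMin ((r2 :: rest2).map pvVal),
             (j + 1) + (specLast ((r2 :: rest2).map pvVal) : Int)) := by
        rw [List.headD_eq_head?_getD, hih, Option.getD_some]
      rw [sufBuild_unfold, hD]
      by_cases hv : pvVal r < specMin ((r2 :: rest2).map pvVal)
      · rw [if_pos hv, List.head?_cons]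
        have h1 : specMin ((r :: r2 :: rest2).map pvVal) = pvVal r := by
          rw [List.map_cons, List.map_cons, specMin_cons2, ← List.map_cons]
          exact min_eq_left (le_of_lt hv)
        have h2 : specLast ((r :: r2 :: rest2).map pvVal) = 0 := by
          rw [List.map_cons, List.map_cons, specLast_cons2, ← List.map_cons,
            if_neg (not_le.mpr hv)]
        rw [h1, h2]
        simp
      · rw [if_neg hv, List.head?_cons]
        have hle := le_of_not_gt hv
        have h1 : specMin ((r :: r2 :: rest2).map pvVal)
            = specMin ((r2 :: rest2).map pvVal) := by
          rw [List.map_cons, List.map_cons, specMin_cons2, ← List.map_cons]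
          exact min_eq_right hle
        have h2 : specLast ((r :: r2 :: rest2).map pvVal)
            = specLast ((r2 :: rest2).map pvVal) + 1 := by
          rw [List.map_cons, List.map_cons, specLast_cons2, ← List.map_cons, if_pos hle]
        rw [h1, h2]
        congr 2
        push_cast; ring

lemma sufBuild_get (l : List (List Int)) (j : Int) (k : Nat) :
    (sufBuild l j)[k]? = (sufBuild (l.drop k) (j + k)).head? := by
  induction l generalizing j k with
  | nil => simp [sufBuild]
  | cons r rest ih =>
    cases k with
    | zero =>
      simp only [List.drop_zero, Nat.cast_zero, add_zero]
      cases sufBuild (r :: rest) j <;> rfl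
    | succ k =>
      rw [sufBuild_get_succ, ih (j + 1) k, List.drop_succ_cons]
      congr 2
      push_cast; ring

lemma loop_eq (xs : List (List Int)) (fuel : Nat) :
    ∀ i : Int, 0 ≤ i → offlineLoop xs fuel i = altLoop xs (sufBuild xs 0) fuel i := by
  induction fuel with
  | zero => intro i _; rfl
  | succ fuel ih =>
    intro i hi
    have ha : offlineLoop xs (fuel + 1) i =
        if i < (xs.length : Int) then
          if aLast xs i = 0 then
            [pvTime ((PySem.List.pyGet? xs i).getD []), aMin xs i] :: offlineLoop xs fuel (i + 1)
          else if i + aLast xs i = (xs.length : Int) - 1 then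
            [pvTime ((PySem.List.pyGet? xs i).getD []), aMin xs i] ::
              [[pvTime ((PySem.List.pyGet? xs (-1)).getD []), aMin xs i]]
          else
            [pvTime ((PySem.List.pyGet? xs i).getD []), aMin xs i] ::
              offlineLoop xs fuel (i + aLast xs i + 1)
        else [] := rfl
    have hb : altLoop xs (sufBuild xs 0) (fuel + 1) i =
        if i < (xs.length : Int) then
          if ((PySem.List.pyGet? (sufBuild xs 0) i).getD (0, 0)).2 = i then
            [pvTime ((PySem.List.pyGet? xs i).getD []),
              ((PySem.List.pyGet? (sufBuild xs 0) i).getD (0, 0)).1] ::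
              altLoop xs (sufBuild xs 0) fuel (i + 1)
          else if ((PySem.List.pyGet? (sufBuild xs 0) i).getD (0, 0)).2
              = (xs.length : Int) - 1 then
            [pvTime ((PySem.List.pyGet? xs i).getD []),
              ((PySem.List.pyGet? (sufBuild xs 0) i).getD (0, 0)).1] ::
              [[pvTime ((PySem.List.pyGet? xs (-1)).getD []),
                ((PySem.List.pyGet? (sufBuild xs 0) i).getD (0, 0)).1]]
          else
            [pvTime ((PySem.List.pyGet? xs i).getD []),
              ((PySem.List.pyGet? (sufBuild xs 0) i).getD (0, 0)).1] ::
              altLoop xs (sufBuild xs 0) fuel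
                (((PySem.List.pyGet? (sufBuild xs 0) i).getD (0, 0)).2 + 1)
        else [] := rfl
    rw [ha, hb]
    by_cases hlt : i < (xs.length : Int)
    · rw [if_pos hlt, if_pos hlt]
      have hk : i = ((i.toNat : Nat) : Int) := (Int.toNat_of_nonneg hi).symm
      have hklen : i.toNat < xs.length := by
        rw [hk] at hlt
        exact_mod_cast hlt
      have hdrop : xs.drop i.toNat ≠ [] := by
        intro hc
        have := congrArg List.length hc
        simp at this; omega
      have hysne : (xs.drop i.toNat).map pvVal ≠ [] := by
        simpa using hdrop
      have hslice : PySem.List.slice xs (some i) (some (xs.length : Int)) = xs.drop i.toNat := by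
        rw [PySem.List.slice_toNat _ hi (by positivity)]
        apply List.take_of_length_le
        simp
      have hAmin : aMin xs i = specMin ((xs.drop i.toNat).map pvVal) := by
        unfold aMin
        rw [hslice]
        exact amin_spec _ hysne
      have hALast : aLast xs i = ((specLast ((xs.drop i.toNat).map pvVal) : Nat) : Int) := by
        unfold aLast
        rw [hAmin, hslice,
          lastF _ 0 _ (specMin_mem _ hysne), Option.getD_some, lastG _ hysne, zero_add]
      have hgd : (PySem.List.pyGet? (sufBuild xs 0) i).getD (0, 0)
          = (specMin ((xs.drop i.toNat).map pvVal),
             i + ((specLast ((xs.drop i.toNat).map pvVal) : Nat) : Int)) := by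
        have e1 : PySem.List.pyGet? (sufBuild xs 0) i = (sufBuild xs 0)[i.toNat]? := by
          conv_lhs => rw [hk]
          exact PySem.List.pyGet?_natCast _ _
        have e2 : (0 : Int) + (i.toNat : Int) = i := by omega
        rw [e1, sufBuild_get, e2, sufBuild_head _ hdrop i, Option.getD_some]
      rw [hAmin, hALast, hgd]
      by_cases h0 : specLast ((xs.drop i.toNat).map pvVal) = 0
      · rw [if_pos (show ((specLast ((xs.drop i.toNat).map pvVal) : Nat) : Int) = 0 by omega),
          if_pos ((by omega :
            i + ((specLast ((xs.drop i.toNat).map pvVal) : Nat) : Int) = i)),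
          ih (i + 1) (by omega)]
      · rw [if_neg (show ¬ ((specLast ((xs.drop i.toNat).map pvVal) : Nat) : Int) = 0 by omega),
          if_neg ((by omega :
            ¬ i + ((specLast ((xs.drop i.toNat).map pvVal) : Nat) : Int) = i))]
        by_cases hend : i + ((specLast ((xs.drop i.toNat).map pvVal) : Nat) : Int)
            = (xs.length : Int) - 1
        · rw [if_pos hend, if_pos hend]
        · rw [if_neg hend, if_neg hend,
            ih (i + ((specLast ((xs.drop i.toNat).map pvVal) : Nat) : Int) + 1) (by omega)]
    · rw [if_neg hlt, if_neg hlt]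

-- ===== VERDICT (by name: the statement is the Claim_ definition above) =====
theorem offline_spec : Claim_equal_offline := by
  intro xs _ _
  unfold Spec_offline offline offline_alt
  exact loop_eq xs xs.length 0 le_rfl
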